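-- pv_equiv track=rewrite | github.com/Rubilask/langton | langton_customized.py | defining_rules
-- ===== SOURCE A (Python) =====
-- def defining_rules(rule):
--     patern=[[90],[0,0]]
--     p=len(rule)
--     i=0
--     while i<p:
--         if rule[i] == "Up" :
--             patern[0][0]=0
--             patern[1][1]-=1
--         if rule[i] == "Down" :
--             patern[0][0]=180
--             patern[1][1]+=1
--         if rule[i] == 'Right':
--             patern[0][0]=-90
--             patern[1][0]+=1
--         if rule[i] == 'Left':
--             patern[0][0]=90
--             patern[1][0]-=1
--         i+=1
--     return(patern)
-- ===== SOURCE B (Python) =====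
-- def defining_rules(rule):
--     ANGLE = {'Up': 0, 'Down': 180, 'Right': -90, 'Left': 90}
--     angle = 90
--     for d in reversed(rule):
--         if d in ANGLE:
--             angle = ANGLE[d]
--             break
--     dx = rule.count('Right') - rule.count('Left')
--     dy = rule.count('Down') - rule.count('Up')
--     return [[angle], [dx, dy]]
-- ===== Notes on version B (the rewrite author's own statement) =====
-- stated objective: simpler
-- what changed: Replaces the single index-driven while loop mutating a nested list with count() scans for the offsets and a reverse scan (first hit wins) for the final angle.
import Mathlib
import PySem

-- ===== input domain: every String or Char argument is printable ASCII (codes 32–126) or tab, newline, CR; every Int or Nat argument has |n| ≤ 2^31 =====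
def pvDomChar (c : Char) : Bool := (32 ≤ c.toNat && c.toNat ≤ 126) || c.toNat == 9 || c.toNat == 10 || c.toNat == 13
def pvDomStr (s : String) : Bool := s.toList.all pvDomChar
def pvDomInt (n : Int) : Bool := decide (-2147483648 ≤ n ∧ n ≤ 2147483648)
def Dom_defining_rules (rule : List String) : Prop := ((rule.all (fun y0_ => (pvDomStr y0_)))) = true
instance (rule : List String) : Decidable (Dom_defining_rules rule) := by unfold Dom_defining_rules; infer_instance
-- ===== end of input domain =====

-- B replaces the mutating while loop by count() scans for the offsets and a reverse scan for the angle (objective: simpler).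
-- ===== PORT A =====
def drLoop : List String → Int → Int → Int → Int × Int × Int
  | [], a, x, y => (a, x, y)
  | s :: t, a, x, y =>
    -- each Python 'if' performs two assignments; ported as one if per assigned variable
    let a := if s = "Up" then (0 : Int) else a
    let y := if s = "Up" then y - 1 else y
    let a := if s = "Down" then (180 : Int) else a
    let y := if s = "Down" then y + 1 else y
    let a := if s = "Right" then (-90 : Int) else a
    let x := if s = "Right" then x + 1 else x
    let a := if s = "Left" then (90 : Int) else a
    let x := if s = "Left" then x - 1 else x
    drLoop t a x y

def defining_rules (rule : List String) : List (List Int) :=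
  let (a, x, y) := drLoop rule 90 0 0
  [[a], [x, y]]

-- ===== PORT B =====
def angleOf? (s : String) : Option Int :=
  if s = "Up" then some 0
  else if s = "Down" then some 180
  else if s = "Right" then some (-90)
  else if s = "Left" then some 90
  else none

def defining_rules_alt (rule : List String) : List (List Int) :=
  [[(rule.reverse.findSome? angleOf?).getD 90],
   [PySem.List.count rule "Right" - PySem.List.count rule "Left",
    PySem.List.count rule "Down" - PySem.List.count rule "Up"]]

-- ===== PRECONDITION & SPEC =====
def Spec_defining_rules (rule : List String) (out : List (List Int)) : Prop := out = defining_rules_alt rule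
instance (rule : List String) (out : List (List Int)) : Decidable (Spec_defining_rules rule out) := by unfold Spec_defining_rules; infer_instance

-- ===== CLAIM (what is proved, stated in full; the proofs are below) =====
def Claim_equal_defining_rules : Prop := ∀ (rule : List String), Dom_defining_rules rule → Spec_defining_rules rule (defining_rules rule)

-- ===== LEMMAS AND PROOFS =====
theorem drLoop_eq (t : List String) : ∀ (a x y : Int),
    drLoop t a x y =
      ((t.reverse.findSome? angleOf?).getD a,
       x + PySem.List.count t "Right" - PySem.List.count t "Left",
       y + PySem.List.count t "Down" - PySem.List.count t "Up") := by
  induction t with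
  | nil => intro a x y; simp [drLoop, PySem.List.count]
  | cons s t ih =>
    intro a x y
    rw [drLoop]
    by_cases h1 : s = "Up" <;> by_cases h2 : s = "Down" <;> by_cases h3 : s = "Right" <;>
      by_cases h4 : s = "Left" <;>
      simp_all [ih, PySem.List.count, angleOf?, List.findSome?_append] <;>
      cases hopt : t.reverse.findSome? angleOf? <;> simp_all <;> omega

-- ===== VERDICT (by name: the statement is the Claim_ definition above) =====
theorem defining_rules_spec : Claim_equal_defining_rules := by
  intro rule _
  unfold Spec_defining_rules defining_rules defining_rules_alt
  rw [drLoop_eq]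
  simp
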